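-- pv_equiv track=rewrite | github.com/pypi-data/pypi-mirror-219 | packages/task2a/task2a-1.0.22.tar.gz/task2a-1.0.22/pwgen/pwgen.py | split_placeholders
-- ===== SOURCE A (Python) =====
-- from typing import Optional, List
--
-- def split_placeholders(placeholders: str) -> List[str]:
--     """
--     Split pattern to a char list and join ^, \\<char> and ^\\<char> into one element
--     :param placeholders: placeholder charset string, for instance, Ld^l^\\4^\\5^\\6^\\7^\\8
--     :return: list with a single placeholder
--     """
--     ret = []
--     t = ''
--     for el in list(placeholders):
--         if el in '^\\' and not t:
--             t = el
--         elif t == '^' and el == '\\':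
--             t += el
--         elif t == '^' or t == '\\' or t == '^\\':
--             t += el
--             ret.append(t)
--             t = ''
--         else:
--             ret.append(el)
--
--     return ret
-- ===== SOURCE B (Python) =====
-- def split_placeholders(placeholders):
--     """Index-based lookahead parser: examine s[i] and up to two following
--     characters and emit whole tokens at once; incomplete trailing tokens
--     ('^', '\\' or '^\\' at the end) are consumed without emitting."""
--     ret = []
--     i, n = 0, len(placeholders)
--     while i < n:
--         c = placeholders[i]
--         if c == '^':
--             if i + 1 < n and placeholders[i + 1] == '\\':
--                 if i + 2 < n:
--                     ret.append(placeholders[i:i + 3])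
--                 i += 3
--             else:
--                 if i + 1 < n:
--                     ret.append(placeholders[i:i + 2])
--                 i += 2
--         elif c == '\\':
--             if i + 1 < n:
--                 ret.append(placeholders[i:i + 2])
--             i += 2
--         else:
--             ret.append(c)
--             i += 1
--     return ret
-- ===== Notes on version B (the rewrite author's own statement) =====
-- stated objective: alternative
-- what changed: Replaces A's state-machine accumulator (pending-prefix string t carried through the loop) with an index-based lookahead parser that inspects up to three characters at a time and emits whole tokens, consuming incomplete trailing tokens without emitting.
import Mathlib
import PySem

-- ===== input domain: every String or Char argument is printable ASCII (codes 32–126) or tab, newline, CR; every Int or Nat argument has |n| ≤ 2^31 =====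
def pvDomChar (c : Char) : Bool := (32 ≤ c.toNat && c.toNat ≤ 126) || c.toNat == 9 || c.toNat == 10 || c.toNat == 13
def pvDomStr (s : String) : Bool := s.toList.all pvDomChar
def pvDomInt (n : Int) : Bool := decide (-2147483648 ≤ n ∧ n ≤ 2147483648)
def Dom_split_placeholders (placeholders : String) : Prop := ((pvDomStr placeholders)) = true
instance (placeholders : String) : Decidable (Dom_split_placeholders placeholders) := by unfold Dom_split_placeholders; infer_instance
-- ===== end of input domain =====

-- B is an index-based lookahead parser emitting whole tokens at once, replacing A's
-- state-machine accumulator; same cost, different decomposition (objective: alternative).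

-- ===== PORT A =====
-- state: (ret, t) with t the pending prefix kept as a list of chars
def splitA_step (st : List String × List Char) (el : Char) : List String × List Char :=
  if (el = '^' ∨ el = '\\') ∧ st.2 = [] then (st.1, [el])
  else if st.2 = ['^'] ∧ el = '\\' then (st.1, st.2 ++ [el])
  else if st.2 = ['^'] ∨ st.2 = ['\\'] ∨ st.2 = ['^', '\\'] then
    (st.1 ++ [String.mk (st.2 ++ [el])], [])
  else (st.1 ++ [String.mk [el]], [])

def split_placeholders (placeholders : String) : List String :=
  (placeholders.toList.foldl splitA_step ([], [])).1

-- ===== PORT B =====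
-- lookahead parser: inspect up to three leading characters, emit the token, recurse
def splitB : List Char → List String
  | '^' :: '\\' :: c :: rest => String.mk ['^', '\\', c] :: splitB rest
  | ['^', '\\'] => []
  | '^' :: c :: rest => String.mk ['^', c] :: splitB rest
  | ['^'] => []
  | '\\' :: c :: rest => String.mk ['\\', c] :: splitB rest
  | ['\\'] => []
  | c :: rest => String.mk [c] :: splitB rest
  | [] => []

def split_placeholders_alt (placeholders : String) : List String :=
  splitB placeholders.toList

-- ===== PRECONDITION & SPEC =====
def Spec_split_placeholders (placeholders : String) (out : List String) : Prop := out = split_placeholders_alt placeholders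
instance (placeholders : String) (out : List String) : Decidable (Spec_split_placeholders placeholders out) := by unfold Spec_split_placeholders; infer_instance

-- ===== CLAIM (what is proved, stated in full; the proofs are below) =====
def Claim_equal_split_placeholders : Prop := ∀ (placeholders : String), Dom_split_placeholders placeholders → Spec_split_placeholders placeholders (split_placeholders placeholders)

-- ===== LEMMAS AND PROOFS =====

lemma foldl_splitA (l : List Char) (ret : List String) :
    (l.foldl splitA_step (ret, [])).1 = ret ++ splitB l := by
  induction l using splitB.induct generalizing ret with
  | case1 c rest ih =>
      simp [List.foldl, splitA_step, splitB, ih]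
  | case2 =>
      simp [List.foldl, splitA_step, splitB]
  | case3 c rest h1 h2 ih =>
      have hc : c ≠ '\\' := by
        rintro rfl
        cases rest with
        | nil => exact h2 rfl rfl
        | cons a l => exact h1 a l rfl rfl
      simp [List.foldl, splitA_step, splitB, hc, ih]
  | case4 =>
      simp [List.foldl, splitA_step, splitB]
  | case5 c rest ih =>
      simp [List.foldl, splitA_step, splitB, ih]
  | case6 =>
      simp [List.foldl, splitA_step, splitB]
  | case7 c rest h1 h2 h3 h4 h5 h6 ih =>
      have hc1 : c ≠ '^' := by
        rintro rfl
        cases rest with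
        | nil => exact h4 rfl rfl
        | cons a l => exact h3 a l rfl rfl
      have hc2 : c ≠ '\\' := by
        rintro rfl
        cases rest with
        | nil => exact h6 rfl rfl
        | cons a l => exact h5 a l rfl rfl
      simp [List.foldl, splitA_step, splitB, hc1, hc2, ih]
  | case8 =>
      simp [List.foldl, splitB]

-- ===== VERDICT (by name: the statement is the Claim_ definition above) =====
theorem split_placeholders_spec : Claim_equal_split_placeholders := by
  intro placeholders _
  show _ = _
  simpa [split_placeholders, split_placeholders_alt] using
    foldl_splitA placeholders.toList []
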